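-- pv_equiv track=rewrite | github.com/pypi-data/pypi-mirror-240 | packages/smart-home-tng/smart_home_tng-2023.1.11-py3-none-any.whl/smart_home_tng/core/helpers/percentage.py | percentage_to_ordered_list_item
-- ===== SOURCE A (Python) =====
-- import typing
--
-- _T = typing.TypeVar("_T")
--
-- def percentage_to_ordered_list_item(ordered_list: list[_T], percentage: int) -> _T:
--     """Find the item that most closely matches the percentage in an ordered list.
--
--     When using this utility for fan speeds, do not include "off"
--
--     Given the list: ["low", "medium", "high", "very_high"], this
--     function will return the following when when the item is passed
--     in:
--
--         1-25: low
--         26-50: medium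
--         51-75: high
--         76-100: very_high
--     """
--     if not (list_len := len(ordered_list)):
--         raise ValueError("The ordered list is empty")
--
--     for offset, speed in enumerate(ordered_list):
--         list_position = offset + 1
--         upper_bound = (list_position * 100) // list_len
--         if percentage <= upper_bound:
--             return speed
--
--     return ordered_list[-1]
-- ===== SOURCE B (Python) =====
-- def percentage_to_ordered_list_item(ordered_list, percentage):
--     """O(1) closed form: the matched index is ceil(percentage*n/100) clamped to [1, n], minus 1."""
--     list_len = len(ordered_list)
--     if not list_len:
--         raise ValueError("The ordered list is empty")
--     k = -(-percentage * list_len // 100)  # ceil(percentage * list_len / 100)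
--     return ordered_list[max(1, min(list_len, k)) - 1]
-- ===== Notes on version B (the rewrite author's own statement) =====
-- stated objective: faster
-- what changed: Replaced A's linear scan over enumerate(ordered_list) for the first bucket whose upper bound covers the percentage by a closed-form O(1) index computation: clamp(ceil(percentage*len/100), 1, len) - 1.
import Mathlib
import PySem

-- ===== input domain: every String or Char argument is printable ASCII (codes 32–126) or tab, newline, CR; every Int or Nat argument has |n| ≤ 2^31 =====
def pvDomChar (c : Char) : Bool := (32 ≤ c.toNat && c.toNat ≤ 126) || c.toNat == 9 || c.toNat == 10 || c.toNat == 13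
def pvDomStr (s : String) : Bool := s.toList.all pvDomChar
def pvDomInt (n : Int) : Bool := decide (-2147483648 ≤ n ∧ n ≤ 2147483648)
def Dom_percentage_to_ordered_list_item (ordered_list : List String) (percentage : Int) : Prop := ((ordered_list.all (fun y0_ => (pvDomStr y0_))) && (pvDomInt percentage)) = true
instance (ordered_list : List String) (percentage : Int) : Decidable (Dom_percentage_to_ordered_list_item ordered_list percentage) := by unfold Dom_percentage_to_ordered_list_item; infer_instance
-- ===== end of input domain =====

-- B replaces A's linear scan for the first bucket by the O(1) closed form
-- index = clamp(ceil(percentage*len/100), 1, len) - 1.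

-- ===== PORT A =====
-- the 'for offset, speed in enumerate(ordered_list)' loop; returns none when it falls through
def pvLoopA (rest : List String) (list_len percentage : Int) (offset : Nat) : Option String :=
  match rest with
  | [] => none
  | speed :: xs =>
      -- list_position = offset + 1; upper_bound = (list_position * 100) // list_len
      if percentage ≤ PySem.Int.floordiv (((offset : Int) + 1) * 100) list_len then some speed
      else pvLoopA xs list_len percentage (offset + 1)

def percentage_to_ordered_list_item (ordered_list : List String) (percentage : Int) : String :=
  -- 'if not list_len: raise ValueError' is excluded by Pre_ (port returns "" there)
  match pvLoopA ordered_list (ordered_list.length : Int) percentage 0 with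
  | some speed => speed
  | none => (PySem.List.pyGet? ordered_list (-1)).getD ""   -- ordered_list[-1]

-- ===== PORT B =====
def percentage_to_ordered_list_item_alt (ordered_list : List String) (percentage : Int) : String :=
  let list_len : Int := ordered_list.length
  -- 'if not list_len: raise ValueError' is excluded by Pre_ (pyGet? is none there, getD "")
  let k : Int := -(PySem.Int.floordiv (-percentage * list_len) 100)
  (PySem.List.pyGet? ordered_list (max 1 (min list_len k) - 1)).getD ""

-- ===== PRECONDITION & SPEC =====
-- A raises ValueError on the empty list; that input is excluded.
def Pre_percentage_to_ordered_list_item (ordered_list : List String) (_percentage : Int) : Prop :=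
  ordered_list ≠ []
instance (ordered_list : List String) (percentage : Int) : Decidable (Pre_percentage_to_ordered_list_item ordered_list percentage) := by unfold Pre_percentage_to_ordered_list_item; infer_instance
def pvWitness_percentage_to_ordered_list_item : List String × Int := (["low", "high"], 30)

def Spec_percentage_to_ordered_list_item (ordered_list : List String) (percentage : Int) (out : String) : Prop := out = percentage_to_ordered_list_item_alt ordered_list percentage
instance (ordered_list : List String) (percentage : Int) (out : String) : Decidable (Spec_percentage_to_ordered_list_item ordered_list percentage out) := by unfold Spec_percentage_to_ordered_list_item; infer_instance

-- ===== CLAIM (what is proved, stated in full; the proofs are below) =====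
def Claim_equal_percentage_to_ordered_list_item : Prop := ∀ (ordered_list : List String) (percentage : Int), Dom_percentage_to_ordered_list_item ordered_list percentage → Pre_percentage_to_ordered_list_item ordered_list percentage → Spec_percentage_to_ordered_list_item ordered_list percentage (percentage_to_ordered_list_item ordered_list percentage)

-- ===== LEMMAS AND PROOFS =====

-- A's loop test at position k is 'percentage*len ≤ k*100'
theorem pvTest_iff (p n k : Int) (hn : 0 < n) :
    (p ≤ PySem.Int.floordiv (k * 100) n) ↔ p * n ≤ k * 100 := by
  rw [PySem.Int.le_floordiv_iff_mul_le hn]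

-- the ceiling c := -((-p*n) // 100) is the least k with p*n ≤ k*100
theorem pvCeil_le_iff (p n k : Int) :
    -(PySem.Int.floordiv (-p * n) 100) ≤ k ↔ p * n ≤ k * 100 := by
  constructor
  · intro h
    have h2 := (PySem.Int.le_floordiv_iff_mul_le (show (0:Int) < 100 by norm_num)).mp
      (show -k ≤ PySem.Int.floordiv (-p * n) 100 by omega)
    nlinarith
  · intro h
    have h2 := (PySem.Int.le_floordiv_iff_mul_le (show (0:Int) < 100 by norm_num)).mpr
      (show -k * 100 ≤ -p * n by nlinarith)
    omega

-- loop characterization: result is rest[(max (offset+1) c) - (offset+1)], out-of-range = none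
theorem pvLoopA_spec (n p : Int) (hn : 0 < n) (rest : List String) (offset : Nat) :
    pvLoopA rest n p offset =
      rest[(max ((offset : Int) + 1) (-(PySem.Int.floordiv (-p * n) 100)) - ((offset : Int) + 1)).toNat]? := by
  induction rest generalizing offset with
  | nil => simp [pvLoopA]
  | cons x xs ih =>
      set c : Int := -(PySem.Int.floordiv (-p * n) 100) with hc
      by_cases h : p ≤ PySem.Int.floordiv (((offset : Int) + 1) * 100) n
      · have hcle : c ≤ (offset : Int) + 1 := by
          rw [hc, pvCeil_le_iff]
          exact (pvTest_iff p n ((offset : Int) + 1) hn).mp h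
        simp [pvLoopA, h]
        have : max ((offset : Int) + 1) c = (offset : Int) + 1 := by omega
        rw [this]
        simp
      · have hcgt : (offset : Int) + 1 < c := by
          by_contra hcon
          exact h ((pvTest_iff p n ((offset : Int) + 1) hn).mpr
            ((pvCeil_le_iff p n ((offset : Int) + 1)).mp (by omega)))
        simp only [pvLoopA, if_neg h]
        rw [ih (offset + 1)]
        have h1 : max ((offset : Int) + 1) c - ((offset : Int) + 1) = c - (offset : Int) - 1 := by omega
        have h2 : max (((offset : Nat) + 1 : Nat) : Int) + 1 = c ∨ True := Or.inr trivial
        have h3 : max ((((offset : Nat) + 1 : Nat) : Int) + 1) c - ((((offset : Nat) + 1 : Nat) : Int) + 1) = c - (offset : Int) - 2 := by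
          push_cast; omega
        rw [h1, h3]
        have h4 : (c - (offset : Int) - 1).toNat = (c - (offset : Int) - 2).toNat + 1 := by omega
        rw [h4]
        simp

-- ===== VERDICT (by name: the statement is the Claim_ definition above) =====
theorem percentage_to_ordered_list_item_spec : Claim_equal_percentage_to_ordered_list_item := by
  intro l p _ hne
  unfold Spec_percentage_to_ordered_list_item percentage_to_ordered_list_item percentage_to_ordered_list_item_alt
  have hn : 0 < (l.length : Int) := by
    have := List.length_pos_iff.mpr hne
    exact_mod_cast this
  set n : Int := (l.length : Int) with hdefn
  set c : Int := -(PySem.Int.floordiv (-p * n) 100) with hc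
  rw [pvLoopA_spec n p hn l 0]
  simp only [Nat.cast_zero, zero_add]
  by_cases hcn : c ≤ n
  · -- in range: loop finds the element; min n c = c
    have hmin : min n c = c := by omega
    have he : (max (1 : Int) c - 1).toNat = (max 1 c).toNat - 1 := by omega
    have hidx : (max 1 c).toNat - 1 < l.length := by omega
    have h1 : max (1 : Int) c - 1 = (((max 1 c).toNat - 1 : Nat) : Int) := by omega
    rw [hmin, h1, PySem.List.pyGet?_natCast]
    simp only [Int.toNat_natCast]
    rw [List.getElem?_eq_getElem hidx]
    rfl
  · -- past the end: loop returns none, fallback is the last element; clamp gives n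
    have hnone : (max (1 : Int) c - 1).toNat ≥ l.length := by omega
    rw [List.getElem?_eq_none (by omega)]
    have hmm : max 1 (min n c) - 1 = n - 1 := by omega
    rw [hmm]
    have hlast : n - 1 = (((l.length - 1 : Nat) : Nat) : Int) := by omega
    rw [hlast, PySem.List.pyGet?_natCast]
    rw [PySem.List.pyGet?_neg_one]
    rw [List.getLast?_eq_getElem?]
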